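-- pv_equiv track=rewrite | github.com/hacetheworld/competitive-programming-practices | contests/codeforce/div2/Educational Round/101/B.py | Solution
-- ===== SOURCE A (Python) =====
-- def Solution(r, b):
--     lr = [0]
--     for i in range(len(r)):
--         lr.append((lr[-1]+r[i]))
--     br = [0]
--     for i in range(len(b)):
--         br.append((br[-1]+b[i]))
--     ans = 0
--     for k in range(len(lr)):
--         for l in range(len(br)):
--             ans = max(ans, lr[k]+br[l])
--     return ans
-- ===== SOURCE B (Python) =====
-- def Solution(r, b):
--     def best(xs):
--         s = m = 0
--         for x in xs:
--             s += x
--             if s > m: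
--                 m = s
--         return m
--     return best(r) + best(b)
-- ===== Notes on version B (the rewrite author's own statement) =====
-- stated objective: faster
-- what changed: Replaced the prefix-sum tables and the nested all-pairs max scan by one running-prefix-max pass over each list, adding the two maxima (valid because max over pairs of sums splits into the sum of the per-list maxima, and 0 is always among the prefix sums).
import Mathlib
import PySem

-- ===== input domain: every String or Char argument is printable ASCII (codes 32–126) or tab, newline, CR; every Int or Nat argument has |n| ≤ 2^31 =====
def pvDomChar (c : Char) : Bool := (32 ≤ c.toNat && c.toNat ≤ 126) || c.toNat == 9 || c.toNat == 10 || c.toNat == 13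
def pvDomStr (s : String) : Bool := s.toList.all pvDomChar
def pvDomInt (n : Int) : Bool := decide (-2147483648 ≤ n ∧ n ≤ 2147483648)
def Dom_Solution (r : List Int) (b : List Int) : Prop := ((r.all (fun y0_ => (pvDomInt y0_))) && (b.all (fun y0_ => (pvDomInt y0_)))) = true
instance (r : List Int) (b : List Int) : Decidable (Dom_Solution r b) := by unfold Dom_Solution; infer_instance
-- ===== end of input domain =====

-- B replaces A's prefix-sum tables and nested all-pairs max scan by one running
-- prefix-max pass per list, adding the two maxima (asymptotically faster, O(n+m) vs O(n*m)).

-- ===== PORT A =====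
-- lr[-1] and r[i] never raise here (lr is nonempty, i in range), so pyGetD with default 0 is exact.
def Solution (r : List Int) (b : List Int) : Int :=
  let lr := (PySem.List.pyRange 0 (r.length : Int) 1).foldl
    (fun lr i => lr ++ [PySem.List.pyGetD lr (-1) 0 + PySem.List.pyGetD r i 0]) [0]
  let br := (PySem.List.pyRange 0 (b.length : Int) 1).foldl
    (fun br i => br ++ [PySem.List.pyGetD br (-1) 0 + PySem.List.pyGetD b i 0]) [0]
  (PySem.List.pyRange 0 (lr.length : Int) 1).foldl
    (fun ans k => (PySem.List.pyRange 0 (br.length : Int) 1).foldl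
      (fun ans l => max ans (PySem.List.pyGetD lr k 0 + PySem.List.pyGetD br l 0)) ans) 0

-- ===== PORT B =====
def bestAlt (xs : List Int) : Int :=
  (xs.foldl (fun (p : Int × Int) x =>
      let s := p.1 + x
      (s, if s > p.2 then s else p.2)) (0, 0)).2

def Solution_alt (r : List Int) (b : List Int) : Int :=
  bestAlt r + bestAlt b

-- ===== PRECONDITION & SPEC =====
def Spec_Solution (r : List Int) (b : List Int) (out : Int) : Prop := out = Solution_alt r b
instance (r : List Int) (b : List Int) (out : Int) : Decidable (Spec_Solution r b out) := by unfold Spec_Solution; infer_instance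

-- ===== CLAIM (what is proved, stated in full; the proofs are below) =====
def Claim_equal_Solution : Prop := ∀ (r : List Int) (b : List Int), Dom_Solution r b → Spec_Solution r b (Solution r b)

-- ===== LEMMAS AND PROOFS =====

-- list of prefix sums of xs starting from s (A's lr/br tables)
def pr (s : Int) : List Int → List Int
  | [] => [s]
  | x :: t => s :: pr (s + x) t

-- maximum of a (nonempty) list
def mx : List Int → Int
  | [] => 0
  | a :: t => t.foldl max a

theorem pr_cons (xs : List Int) (s : Int) : ∃ u, pr s xs = s :: u := by
  cases xs <;> simp [pr]

theorem loopA (xs : List Int) : ∀ (pre : List Int) (s : Int),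
    xs.foldl (fun lr x => lr ++ [PySem.List.pyGetD lr (-1) 0 + x]) (pre ++ [s]) = pre ++ pr s xs := by
  induction xs with
  | nil => intro pre s; simp [pr]
  | cons x t ih =>
    intro pre s
    simp only [List.foldl_cons, PySem.List.pyGetD_neg_one_append_singleton]
    have h : (pre ++ [s]) ++ [s + x] = (pre ++ [s]) ++ [s + x] := rfl
    calc t.foldl (fun lr y => lr ++ [PySem.List.pyGetD lr (-1) 0 + y]) ((pre ++ [s]) ++ [s + x])
        = (pre ++ [s]) ++ pr (s + x) t := ih (pre ++ [s]) (s + x)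
      _ = pre ++ pr s (x :: t) := by simp [pr]

theorem foldl_max_init (t : List Int) : ∀ a b : Int, t.foldl max (max a b) = max a (t.foldl max b) := by
  induction t with
  | nil => intro a b; rfl
  | cons y u ih =>
    intro a b
    simp only [List.foldl_cons]
    rw [max_assoc, ih]

theorem le_foldl_max' (t : List Int) : ∀ a : Int, a ≤ t.foldl max a := by
  induction t with
  | nil => intro a; exact le_refl a
  | cons y u ih =>
    intro a
    exact le_trans (le_max_left a y) (ih (max a y))

theorem head_le_mx (t : List Int) (a : Int) : a ≤ mx (a :: t) := le_foldl_max' t a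

theorem mx_cons (t : List Int) (a b : Int) : mx (a :: b :: t) = max a (mx (b :: t)) := by
  simp only [mx, List.foldl_cons]
  exact foldl_max_init t a b

-- inner fold: scanning y over s::t with max ans (x + y)
theorem inner_fold (t : List Int) : ∀ (x a s : Int),
    t.foldl (fun a y => max a (x + y)) (max a (x + s)) = max a (x + t.foldl max s) := by
  induction t with
  | nil => intro x a s; rfl
  | cons y u ih =>
    intro x a s
    simp only [List.foldl_cons]
    have h : max (max a (x + s)) (x + y) = max a (x + max s y) := by omega
    rw [h, ih]

-- outer fold with constant second summand c
theorem outer_fold (t : List Int) : ∀ (c a s : Int),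
    t.foldl (fun a x => max a (x + c)) (max a (s + c)) = max a (t.foldl max s + c) := by
  induction t with
  | nil => intro c a s; rfl
  | cons y u ih =>
    intro c a s
    simp only [List.foldl_cons]
    have h : max (max a (s + c)) (y + c) = max a (max s y + c) := by omega
    rw [h, ih]

theorem outer_fold' (s : Int) (t : List Int) (c a : Int) :
    (s :: t).foldl (fun a x => max a (x + c)) a = max a (mx (s :: t) + c) := by
  simp only [List.foldl_cons, mx]
  exact outer_fold t c a s

-- rewrite the nested fold's body using inner_fold'
theorem nested_fold (l : List Int) (c : Int) (d : List Int) : ∀ a : Int,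
    l.foldl (fun ans x => (c :: d).foldl (fun a y => max a (x + y)) ans) a
      = l.foldl (fun a x => max a (x + mx (c :: d))) a := by
  induction l with
  | nil => intro a; rfl
  | cons x t ih =>
    intro a
    rw [List.foldl_cons, List.foldl_cons, inner_fold d x a c, List.foldl_cons, ih]
    simp [mx]

-- bestAlt invariant
theorem bestAlt_inv (xs : List Int) : ∀ (s m : Int), s ≤ m →
    (xs.foldl (fun (p : Int × Int) x => ((p.1 + x), if p.1 + x > p.2 then p.1 + x else p.2)) (s, m)).2
      = max m (mx (pr s xs)) := by
  induction xs with
  | nil =>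
    intro s m hsm
    simp only [List.foldl_nil, pr, mx, List.foldl_nil]
    omega
  | cons x t ih =>
    intro s m hsm
    simp only [List.foldl_cons]
    have hstep : (if s + x > m then s + x else m) = max m (s + x) := by omega
    rw [hstep, ih (s + x) (max m (s + x)) (le_max_right _ _)]
    obtain ⟨u, hu⟩ := pr_cons t (s + x)
    have hle : s + x ≤ mx (pr (s + x) t) := by rw [hu]; exact head_le_mx u (s + x)
    show max (max m (s + x)) (mx (pr (s + x) t)) = max m (mx (pr s (x :: t)))
    rw [show pr s (x :: t) = s :: pr (s + x) t from rfl, hu, mx_cons, ← hu]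
    omega

theorem bestAlt_eq (xs : List Int) : bestAlt xs = mx (pr 0 xs) := by
  have h0 : (0 : Int) ≤ mx (pr 0 xs) := by
    obtain ⟨u, hu⟩ := pr_cons xs 0
    rw [hu]; exact head_le_mx u 0
  have := bestAlt_inv xs 0 0 (le_refl 0)
  simp only [bestAlt]
  omega

theorem buildA (xs : List Int) :
    (PySem.List.pyRange 0 (xs.length : Int) 1).foldl
      (fun lr i => lr ++ [PySem.List.pyGetD lr (-1) 0 + PySem.List.pyGetD xs i 0]) [0]
    = pr 0 xs := by
  rw [PySem.List.foldl_pyRange_zero_pyGetD'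
        (f := fun lr x => lr ++ [PySem.List.pyGetD lr (-1) 0 + x]) (d := 0) (init := ([0] : List Int))]
  have := loopA xs [] 0
  simpa using this

-- ===== VERDICT (by name: the statement is the Claim_ definition above) =====
theorem Solution_spec : Claim_equal_Solution := by
  intro r b _
  show Solution r b = Solution_alt r b
  unfold Solution Solution_alt
  simp only [buildA]
  obtain ⟨ur, hur⟩ := pr_cons r 0
  obtain ⟨ub, hub⟩ := pr_cons b 0
  rw [bestAlt_eq, bestAlt_eq]
  rw [PySem.List.foldl_pyRange_zero_pyGetD'
        (f := fun ans k => (PySem.List.pyRange 0 ((pr 0 b).length : Int) 1).foldl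
          (fun ans l => max ans (k + PySem.List.pyGetD (pr 0 b) l 0)) ans)
        (d := 0) (init := (0 : Int))]
  have hinner : ∀ (a x : Int),
      (PySem.List.pyRange 0 ((pr 0 b).length : Int) 1).foldl
        (fun ans l => max ans (x + PySem.List.pyGetD (pr 0 b) l 0)) a
      = (pr 0 b).foldl (fun ans y => max ans (x + y)) a := by
    intro a x
    exact PySem.List.foldl_pyRange_zero_pyGetD' (pr 0 b) 0 (fun ans y => max ans (x + y)) a
  simp only [hinner]
  rw [hub, nested_fold, ← hub, hur, outer_fold', ← hur]
  have h1 : (0 : Int) ≤ mx (pr 0 r) := by rw [hur]; exact head_le_mx ur 0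
  have h2 : (0 : Int) ≤ mx (pr 0 b) := by rw [hub]; exact head_le_mx ub 0
  omega
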